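-- pv_equiv track=rewrite | github.com/nxank4/loclean | website/migrate_content.py | convert_frontmatter
-- ===== SOURCE A (Python) =====
-- def convert_frontmatter(content: str) -> str:
--     """Convert Astro frontmatter to Nextra format."""
--     if not content.startswith("---"):
--         return content
--
--     # Extract frontmatter
--     parts = content.split("---", 2)
--     if len(parts) < 3:
--         return content
--
--     frontmatter = parts[1].strip()
--     body = parts[2]
--
--     # Parse frontmatter
--     title = None
--     description = None
--     order = None
--
--     for line in frontmatter.split("\n"):
--         line = line.strip()
--         if not line:
--             continue
--         if line.startswith("title:"):
--             title = line.split("title:", 1)[1].strip().strip('"').strip("'")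
--         elif line.startswith("description:"):
--             description = line.split("description:", 1)[1].strip().strip('"').strip("'")
--         elif "order:" in line:
--             order = line.split("order:", 1)[1].strip()
--
--     # Create Nextra frontmatter (simpler format)
--     nextra_fm = []
--     if title:
--         nextra_fm.append(f"title: {title}")
--     if description:
--         nextra_fm.append(f"description: {description}")
--
--     if nextra_fm:
--         return "---\n" + "\n".join(nextra_fm) + "\n---\n\n" + body
--     else:
--         return body
-- ===== SOURCE B (Python) =====
-- def convert_frontmatter(content: str) -> str:
--     """Convert Astro frontmatter to Nextra format (reverse-scan, last match wins)."""
--     if not content.startswith("---"):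
--         return content
--     parts = content.split("---", 2)
--     if len(parts) < 3:
--         return content
--     body = parts[2]
--     lines = [line.strip() for line in parts[1].strip().split("\n")]
--
--     def last_field(prefix):
--         for line in reversed(lines):
--             if line.startswith(prefix):
--                 return line.split(prefix, 1)[1].strip().strip('"').strip("'")
--         return None
--
--     fields = []
--     for key, prefix in (("title", "title:"), ("description", "description:")):
--         value = last_field(prefix)
--         if value:
--             fields.append(f"{key}: {value}")
--     if fields:
--         return "---\n" + "\n".join(fields) + "\n---\n\n" + body
--     return body
-- ===== Notes on version B (the rewrite author's own statement) =====
-- stated objective: simpler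
-- what changed: A's single forward elif-fold over the frontmatter lines with three accumulators (title/description and a dead 'order') is replaced by two independent reverse scans that return the first matching line (= last-wins) and drop the unused order parsing.
import Mathlib
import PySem

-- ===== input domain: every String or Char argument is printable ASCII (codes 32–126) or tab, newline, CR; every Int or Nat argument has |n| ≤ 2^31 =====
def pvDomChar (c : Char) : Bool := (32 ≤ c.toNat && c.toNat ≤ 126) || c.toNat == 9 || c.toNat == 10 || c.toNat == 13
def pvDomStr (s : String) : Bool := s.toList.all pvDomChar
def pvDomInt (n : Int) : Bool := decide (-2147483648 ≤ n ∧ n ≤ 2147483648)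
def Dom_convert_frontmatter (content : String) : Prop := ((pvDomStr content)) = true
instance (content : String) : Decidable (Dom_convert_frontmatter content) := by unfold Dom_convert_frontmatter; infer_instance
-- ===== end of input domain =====

set_option maxHeartbeats 1000000

-- B replaces A's single forward elif-fold over the frontmatter lines (three accumulators,
-- one of them dead) by two reverse scans taking the first match (= last-wins); objective: simpler.

-- ===== PORT A =====
-- value cleanup: .strip().strip('"').strip("'")
def pvCleanA (s : String) : String :=
  PySem.Str.stripChars (PySem.Str.stripChars (PySem.Str.strip s) "\"") "'"

-- line.split(pre, 1)[1]
def pvTailA (line pre : String) : String :=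
  ((PySem.Str.splitMax? line pre 1).getD []).getD 1 ""

-- the body of A's for-loop over frontmatter lines; state = (title, description, order)
def pvStepA (st : Option String × Option String × Option String) (rawLine : String) :
    Option String × Option String × Option String :=
  let line := PySem.Str.strip rawLine
  if line = "" then st
  else if PySem.Str.startswith line "title:" then
    (some (pvCleanA (pvTailA line "title:")), st.2.1, st.2.2)
  else if PySem.Str.startswith line "description:" then
    (st.1, some (pvCleanA (pvTailA line "description:")), st.2.2)
  else if PySem.Str.isIn "order:" line then
    (st.1, st.2.1, some (PySem.Str.strip (pvTailA line "order:")))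
  else st

def convert_frontmatter (content : String) : String :=
  if !PySem.Str.startswith content "---" then content
  else
    let parts := (PySem.Str.splitMax? content "---" 2).getD []
    if parts.length < 3 then content
    else
      let frontmatter := PySem.Str.strip (parts.getD 1 "")
      let body := parts.getD 2 ""
      let st := ((PySem.Str.split? frontmatter "\n").getD []).foldl pvStepA (none, none, none)
      -- nextra_fm = []; if title: append; if description: append
      let fm0 : List String := []
      let fm1 := match st.1 with
        | some t => if t ≠ "" then fm0 ++ ["title: " ++ t] else fm0
        | none => fm0
      let fm2 := match st.2.1 with
        | some d => if d ≠ "" then fm1 ++ ["description: " ++ d] else fm1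
        | none => fm1
      if fm2 ≠ [] then "---\n" ++ PySem.Str.join "\n" fm2 ++ "\n---\n\n" ++ body
      else body

-- ===== PORT B =====
-- line.split(pre, 1)[1].strip().strip('"').strip("'")
def pvExtractB (pre line : String) : String :=
  PySem.Str.stripChars (PySem.Str.stripChars
    (PySem.Str.strip (((PySem.Str.splitMax? line pre 1).getD []).getD 1 "")) "\"") "'"

-- for line in reversed(lines): if line.startswith(prefix): return extract(line); return None
def pvLastField (lines : List String) (pre : String) : Option String :=
  (lines.reverse.find? (fun l => PySem.Str.startswith l pre)).map (pvExtractB pre)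

def convert_frontmatter_alt (content : String) : String :=
  if !PySem.Str.startswith content "---" then content
  else
    let parts := (PySem.Str.splitMax? content "---" 2).getD []
    if parts.length < 3 then content
    else
      let body := parts.getD 2 ""
      let lines := ((PySem.Str.split? (PySem.Str.strip (parts.getD 1 "")) "\n").getD []).map PySem.Str.strip
      let fields := ([("title", "title:"), ("description", "description:")] : List (String × String)).foldl
        (fun acc kp =>
          match pvLastField lines kp.2 with
          | some v => if v ≠ "" then acc ++ [kp.1 ++ ": " ++ v] else acc
          | none => acc) []
      if fields ≠ [] then "---\n" ++ PySem.Str.join "\n" fields ++ "\n---\n\n" ++ body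
      else body

-- ===== PRECONDITION & SPEC =====
def Spec_convert_frontmatter (content : String) (out : String) : Prop := out = convert_frontmatter_alt content
instance (content : String) (out : String) : Decidable (Spec_convert_frontmatter content out) := by unfold Spec_convert_frontmatter; infer_instance

-- ===== CLAIM (what is proved, stated in full; the proofs are below) =====
def Claim_equal_convert_frontmatter : Prop := ∀ (content : String), Dom_convert_frontmatter content → Spec_convert_frontmatter content (convert_frontmatter content)

-- ===== LEMMAS AND PROOFS =====

-- "title:" and "description:" cannot both be prefixes of the same line
theorem pv_excl (l : String) (h : PySem.Str.startswith l "title:" = true) :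
    PySem.Str.startswith l "description:" = false := by
  rw [PySem.Str.startswith_eq] at h ⊢
  cases hd : PySem.Chars.startswith l.toList ("description:").toList
  · rfl
  · exfalso
    rw [PySem.Chars.startswith_iff] at h hd
    obtain ⟨t, ht⟩ := h
    rw [← ht] at hd
    have h1 : ("description:" : String).toList = ['d','e','s','c','r','i','p','t','i','o','n',':'] := rfl
    have h2 : ("title:" : String).toList = ['t','i','t','l','e',':'] := rfl
    rw [h1, h2] at hd
    simp [List.cons_prefix_cons] at hd

-- A's loop step, first component: last-wins update guarded by startswith "title:"
theorem pvStepA_fst (st : Option String × Option String × Option String) (l : String) :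
    (pvStepA st l).1 =
      if PySem.Str.startswith (PySem.Str.strip l) "title:" then
        some (pvExtractB "title:" (PySem.Str.strip l))
      else st.1 := by
  show (let line := PySem.Str.strip l;
    if line = "" then st
    else if PySem.Str.startswith line "title:" then
      (some (pvCleanA (pvTailA line "title:")), st.2.1, st.2.2)
    else if PySem.Str.startswith line "description:" then
      (st.1, some (pvCleanA (pvTailA line "description:")), st.2.2)
    else if PySem.Str.isIn "order:" line then
      (st.1, st.2.1, some (PySem.Str.strip (pvTailA line "order:")))
    else st).1 = _
  simp only []
  by_cases h0 : PySem.Str.strip l = ""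
  · rw [h0, if_pos rfl, if_neg (by decide)]
  · rw [if_neg h0]
    by_cases h1 : PySem.Str.startswith (PySem.Str.strip l) "title:" = true
    · rw [if_pos h1, if_pos h1]; rfl
    · rw [if_neg h1, if_neg h1]
      by_cases h2 : PySem.Str.startswith (PySem.Str.strip l) "description:" = true
      · rw [if_pos h2]
      · rw [if_neg h2]
        by_cases h3 : PySem.Str.isIn "order:" (PySem.Str.strip l) = true
        · rw [if_pos h3]
        · rw [if_neg h3]

-- A's loop step, second component: guarded by startswith "description:" (exclusive with "title:")
theorem pvStepA_snd (st : Option String × Option String × Option String) (l : String) :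
    (pvStepA st l).2.1 =
      if PySem.Str.startswith (PySem.Str.strip l) "description:" then
        some (pvExtractB "description:" (PySem.Str.strip l))
      else st.2.1 := by
  show (let line := PySem.Str.strip l;
    if line = "" then st
    else if PySem.Str.startswith line "title:" then
      (some (pvCleanA (pvTailA line "title:")), st.2.1, st.2.2)
    else if PySem.Str.startswith line "description:" then
      (st.1, some (pvCleanA (pvTailA line "description:")), st.2.2)
    else if PySem.Str.isIn "order:" line then
      (st.1, st.2.1, some (PySem.Str.strip (pvTailA line "order:")))
    else st).2.1 = _
  simp only []
  by_cases h0 : PySem.Str.strip l = ""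
  · rw [h0, if_pos rfl, if_neg (by decide)]
  · rw [if_neg h0]
    by_cases h1 : PySem.Str.startswith (PySem.Str.strip l) "title:" = true
    · rw [if_pos h1, if_neg (by rw [pv_excl _ h1]; exact Bool.false_ne_true)]
    · rw [if_neg h1]
      by_cases h2 : PySem.Str.startswith (PySem.Str.strip l) "description:" = true
      · rw [if_pos h2, if_pos h2]; rfl
      · rw [if_neg h2, if_neg h2]
        by_cases h3 : PySem.Str.isIn "order:" (PySem.Str.strip l) = true
        · rw [if_pos h3]
        · rw [if_neg h3]

-- a last-wins fold equals the first match on the reversed list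
theorem pv_foldl_last {α β : Type} (p : α → Bool) (f : α → β) (ls : List α) (st : Option β) :
    ls.foldl (fun acc l => if p l then some (f l) else acc) st
      = match ls.reverse.find? p with
        | some l => some (f l)
        | none => st := by
  induction ls generalizing st with
  | nil => simp
  | cons l ls ih =>
    simp only [List.foldl_cons, ih, List.reverse_cons, List.find?_append]
    cases hf : ls.reverse.find? p <;> cases hp : p l <;> simp [List.find?, hp]

theorem pv_foldA_fst (ls : List String) (st : Option String × Option String × Option String) :
    (ls.foldl pvStepA st).1 =
      ls.foldl (fun acc l => if PySem.Str.startswith (PySem.Str.strip l) "title:" then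
        some (pvExtractB "title:" (PySem.Str.strip l)) else acc) st.1 := by
  induction ls generalizing st with
  | nil => rfl
  | cons l ls ih => simp only [List.foldl_cons, ih, pvStepA_fst]

theorem pv_foldA_snd (ls : List String) (st : Option String × Option String × Option String) :
    (ls.foldl pvStepA st).2.1 =
      ls.foldl (fun acc l => if PySem.Str.startswith (PySem.Str.strip l) "description:" then
        some (pvExtractB "description:" (PySem.Str.strip l)) else acc) st.2.1 := by
  induction ls generalizing st with
  | nil => rfl
  | cons l ls ih => simp only [List.foldl_cons, ih, pvStepA_snd]

-- B's reverse scan over the pre-stripped lines, pushed back onto the raw lines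
theorem pvLastField_map_strip (raws : List String) (pre : String) :
    pvLastField (raws.map PySem.Str.strip) pre =
      (raws.reverse.find? (fun l => PySem.Str.startswith (PySem.Str.strip l) pre)).map
        (fun l => pvExtractB pre (PySem.Str.strip l)) := by
  unfold pvLastField
  rw [← List.map_reverse]
  generalize raws.reverse = rs
  induction rs with
  | nil => simp
  | cons a t ih =>
    simp only [List.map_cons]
    cases hp : PySem.Str.startswith (PySem.Str.strip a) pre
    · rw [List.find?_cons_of_neg (by simpa using hp), List.find?_cons_of_neg (by simpa using hp)]
      exact ih
    · rw [List.find?_cons_of_pos (by simpa using hp), List.find?_cons_of_pos (by simpa using hp)]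
      simp

-- ===== VERDICT (by name: the statement is the Claim_ definition above) =====
theorem convert_frontmatter_spec : Claim_equal_convert_frontmatter := by
  intro content _
  unfold Spec_convert_frontmatter convert_frontmatter convert_frontmatter_alt
  by_cases h1 : PySem.Str.startswith content "---" = true
  · rw [h1]
    simp only [Bool.not_true, Bool.false_eq_true, if_false]
    by_cases h2 : ((PySem.Str.splitMax? content "---" 2).getD []).length < 3
    · rw [if_pos h2, if_pos h2]
    · rw [if_neg h2, if_neg h2]
      simp only [List.foldl_cons, List.foldl_nil]
      rw [pvLastField_map_strip, pvLastField_map_strip,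
          pv_foldA_fst, pv_foldA_snd, pv_foldl_last, pv_foldl_last]
      cases ((PySem.Str.split? (PySem.Str.strip
              (((PySem.Str.splitMax? content "---" 2).getD []).getD 1 "")) "\n").getD []).reverse.find?
          (fun l => PySem.Str.startswith (PySem.Str.strip l) "title:") <;>
      cases ((PySem.Str.split? (PySem.Str.strip
              (((PySem.Str.splitMax? content "---" 2).getD []).getD 1 "")) "\n").getD []).reverse.find?
          (fun l => PySem.Str.startswith (PySem.Str.strip l) "description:") <;>
        simp
  · rw [Bool.not_eq_true] at h1
    rw [h1]
    simp only [Bool.not_false, if_true]
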